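-- pv_equiv track=rewrite | github.com/posl/comment_recommendation | script/split_gen/2_time/zh/121_D/4.py | f
-- ===== SOURCE A (Python) =====
-- def f(a, b):
--     if a == b:
--         return a
--     elif a % 2 == 0 and b - a == 1:
--         return a | b
--     elif a % 2 == 0 and b % 2 == 0:
--         return f(a >> 1, b >> 1) << 1
--     elif a % 2 == 0 and b % 2 == 1:
--         return f(a >> 1, b >> 1) << 1
--     elif a % 2 == 1 and b % 2 == 0:
--         return f((a + 1) >> 1, b >> 1) << 1
--     elif a % 2 == 1 and b % 2 == 1:
--         return f(a >> 1, b >> 1) << 1 | 1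
-- ===== SOURCE B (Python) =====
-- def f(a, b):
--     # Iterative version: peel low bits while neither base case holds,
--     # then rebuild the result from the base value and the saved bits.
--     bits = []
--     while not (a == b or (a % 2 == 0 and b - a == 1)):
--         bits.append(1 if (a % 2 == 1 and b % 2 == 1) else 0)
--         if a % 2 == 1 and b % 2 == 0:
--             a = (a + 1) >> 1
--         else:
--             a >>= 1
--         b >>= 1
--     res = a if a == b else a | b
--     for bit in reversed(bits):
--         res = res << 1 | bit
--     return res
-- ===== Notes on version B (the rewrite author's own statement) =====
-- stated objective: alternative
-- what changed: Replaces the six-branch recursion by an explicit while loop that saves one low bit per level and a final fold that shifts the saved bits back onto the base-case value.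
import Mathlib
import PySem

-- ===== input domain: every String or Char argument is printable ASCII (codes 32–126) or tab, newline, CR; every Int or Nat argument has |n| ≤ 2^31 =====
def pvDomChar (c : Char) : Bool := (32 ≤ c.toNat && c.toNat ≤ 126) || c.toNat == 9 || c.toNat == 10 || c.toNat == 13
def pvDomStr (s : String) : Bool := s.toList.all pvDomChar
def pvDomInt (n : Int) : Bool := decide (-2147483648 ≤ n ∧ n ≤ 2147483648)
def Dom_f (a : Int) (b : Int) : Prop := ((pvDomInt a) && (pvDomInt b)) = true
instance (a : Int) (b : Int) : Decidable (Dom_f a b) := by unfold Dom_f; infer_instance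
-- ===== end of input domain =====

-- B replaces A's six-branch recursion by a while loop that saves one low bit per
-- level plus a final fold shifting the bits back onto the base value (alternative
-- decomposition, same cost). Equivalence proved on a ≤ b; A raises RecursionError otherwise.

-- ===== PORT A =====
-- fuel-guarded transliteration of A's recursion; fuel (b-a).toNat+1 suffices on a ≤ b
-- (x >> 1 = floor-division by 2, x << 1 = x*2; `|` = Int.lor, exact for Python ints)
def fAux : Nat → Int → Int → Int
  | 0, _, _ => 0
  | fuel+1, a, b =>
    if a = b then a
    else if PySem.Int.mod a 2 = 0 ∧ b - a = 1 then Int.lor a b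
    else if PySem.Int.mod a 2 = 0 ∧ PySem.Int.mod b 2 = 0 then
      fAux fuel (PySem.Int.floordiv a 2) (PySem.Int.floordiv b 2) * 2
    else if PySem.Int.mod a 2 = 0 ∧ PySem.Int.mod b 2 = 1 then
      fAux fuel (PySem.Int.floordiv a 2) (PySem.Int.floordiv b 2) * 2
    else if PySem.Int.mod a 2 = 1 ∧ PySem.Int.mod b 2 = 0 then
      fAux fuel (PySem.Int.floordiv (a+1) 2) (PySem.Int.floordiv b 2) * 2
    else -- a % 2 == 1 and b % 2 == 1 (the only remaining case)
      Int.lor (fAux fuel (PySem.Int.floordiv a 2) (PySem.Int.floordiv b 2) * 2) 1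

def f (a : Int) (b : Int) : Int := fAux ((b - a).toNat + 1) a b

-- ===== PORT B =====
-- the while loop of Source B (fuel-guarded; same sufficiency), returning (bits, a, b)
def fLoop : Nat → Int → Int → List Int → (List Int × Int × Int)
  | 0, a, b, bits => (bits, a, b)
  | fuel+1, a, b, bits =>
    if a = b ∨ (PySem.Int.mod a 2 = 0 ∧ b - a = 1) then (bits, a, b)
    else
      let bit : Int := if PySem.Int.mod a 2 = 1 ∧ PySem.Int.mod b 2 = 1 then 1 else 0
      let a' := if PySem.Int.mod a 2 = 1 ∧ PySem.Int.mod b 2 = 0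
                then PySem.Int.floordiv (a+1) 2 else PySem.Int.floordiv a 2
      fLoop fuel a' (PySem.Int.floordiv b 2) (bits ++ [bit])

def f_alt (a : Int) (b : Int) : Int :=
  let r := fLoop ((b - a).toNat + 1) a b []
  let res := if r.2.1 = r.2.2 then r.2.1 else Int.lor r.2.1 r.2.2
  r.1.reverse.foldl (fun res bit => Int.lor (res * 2) bit) res

-- ===== PRECONDITION & SPEC =====
-- Pre_f excludes a > b, on which Python A recurses forever (RecursionError)
def Pre_f (a : Int) (b : Int) : Prop := a ≤ b
instance (a : Int) (b : Int) : Decidable (Pre_f a b) := by unfold Pre_f; infer_instance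
def pvWitness_f : Int × Int := (3, 9)

def Spec_f (a : Int) (b : Int) (out : Int) : Prop := out = f_alt a b
instance (a : Int) (b : Int) (out : Int) : Decidable (Spec_f a b out) := by unfold Spec_f; infer_instance

-- ===== CLAIM (what is proved, stated in full; the proofs are below) =====
def Claim_equal_f : Prop := ∀ (a : Int) (b : Int), Dom_f a b → Pre_f a b → Spec_f a b (f a b)

-- ===== LEMMAS AND PROOFS =====

-- proof-side helpers: the tail of f_alt, named
def pvStep (res bit : Int) : Int := Int.lor (res * 2) bit
def pvFin (r : List Int × Int × Int) : Int :=
  r.1.reverse.foldl pvStep (if r.2.1 = r.2.2 then r.2.1 else Int.lor r.2.1 r.2.2)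

theorem pvLor_zero (x : Int) : Int.lor x 0 = x := by
  unfold Int.lor; cases x <;> simp [Nat.ldiff]

theorem pvFoldl_snoc (bits : List Int) (bit v : Int) :
    (bits ++ [bit]).reverse.foldl pvStep v = bits.reverse.foldl pvStep (pvStep v bit) := by
  simp

theorem pvMain : ∀ (n : Nat) (a b : Int), a ≤ b → (b - a).toNat < n → ∀ (bits : List Int),
    pvFin (fLoop n a b bits) = bits.reverse.foldl pvStep (fAux n a b) := by
  intro n
  induction n with
  | zero => intro a b _ h; omega
  | succ n ih =>
    intro a b hab hlt bits
    have hma : PySem.Int.mod a 2 = a % 2 := PySem.Int.mod_eq_emod_of_pos (by norm_num)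
    have hmb : PySem.Int.mod b 2 = b % 2 := PySem.Int.mod_eq_emod_of_pos (by norm_num)
    have hda : PySem.Int.floordiv a 2 = a / 2 := PySem.Int.floordiv_eq_ediv_of_pos (by norm_num)
    have hda1 : PySem.Int.floordiv (a+1) 2 = (a+1) / 2 := PySem.Int.floordiv_eq_ediv_of_pos (by norm_num)
    have hdb : PySem.Int.floordiv b 2 = b / 2 := PySem.Int.floordiv_eq_ediv_of_pos (by norm_num)
    by_cases heq : a = b
    · subst heq; simp [fLoop, fAux, pvFin]
    · by_cases hb1 : a % 2 = 0 ∧ b - a = 1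
      · simp [fLoop, fAux, pvFin, heq, hb1]
      · rcases Int.emod_two_eq a with ha | ha <;> rcases Int.emod_two_eq b with hbp | hbp
        · -- even / even
          have hne1 : ¬ (b - a = 1) := fun h => hb1 ⟨ha, h⟩
          have h1 : a/2 ≤ b/2 := by omega
          have h2 : (b/2 - a/2).toNat < n := by omega
          have hstep : fLoop (n+1) a b bits = fLoop n (a/2) (b/2) (bits ++ [0]) := by
            simp [fLoop, heq, ha, hbp, hne1]
          have hA : fAux (n+1) a b = fAux n (a/2) (b/2) * 2 := by
            simp [fAux, heq, ha, hbp, hne1]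
          rw [hstep, ih _ _ h1 h2, hA, pvFoldl_snoc, pvStep, pvLor_zero]
        · -- even / odd
          have hne1 : ¬ (b - a = 1) := fun h => hb1 ⟨ha, h⟩
          have h1 : a/2 ≤ b/2 := by omega
          have h2 : (b/2 - a/2).toNat < n := by omega
          have hstep : fLoop (n+1) a b bits = fLoop n (a/2) (b/2) (bits ++ [0]) := by
            simp [fLoop, heq, ha, hbp, hne1]
          have hA : fAux (n+1) a b = fAux n (a/2) (b/2) * 2 := by
            simp [fAux, heq, ha, hbp, hne1]
          rw [hstep, ih _ _ h1 h2, hA, pvFoldl_snoc, pvStep, pvLor_zero]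
        · -- odd / even
          have h1 : (a+1)/2 ≤ b/2 := by omega
          have h2 : (b/2 - (a+1)/2).toNat < n := by omega
          have hstep : fLoop (n+1) a b bits = fLoop n ((a+1)/2) (b/2) (bits ++ [0]) := by
            simp [fLoop, heq, ha, hbp]
          have hA : fAux (n+1) a b = fAux n ((a+1)/2) (b/2) * 2 := by
            simp [fAux, heq, ha, hbp]
          rw [hstep, ih _ _ h1 h2, hA, pvFoldl_snoc, pvStep, pvLor_zero]
        · -- odd / odd
          have h1 : a/2 ≤ b/2 := by omega
          have h2 : (b/2 - a/2).toNat < n := by omega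
          have hstep : fLoop (n+1) a b bits = fLoop n (a/2) (b/2) (bits ++ [1]) := by
            simp [fLoop, heq, ha, hbp]
          have hA : fAux (n+1) a b = Int.lor (fAux n (a/2) (b/2) * 2) 1 := by
            simp [fAux, heq, ha, hbp]
          rw [hstep, ih _ _ h1 h2, hA, pvFoldl_snoc, pvStep]

theorem f_spec : Claim_equal_f := by
  intro a b _ hpre
  unfold Spec_f f f_alt
  have h := pvMain ((b - a).toNat + 1) a b hpre (by omega) []
  simpa [pvFin, pvStep] using h.symm
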